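-- pv_equiv track=rewrite | github.com/8fdafs2/Codewars-Solu-Python | src/kyu4_Sum_by_Factors.py | sum_for_list_05
-- ===== SOURCE A (Python) =====
-- from collections import defaultdict
--
-- def sum_for_list_05(lst):
--     """
--     x /= f until x < f
--     """
--     hashtab = defaultdict(int)
--
--     for x in lst:
--         _x_ = x
--         if x < 0:
--             x = -x
--         i = 2
--         while i <= x:
--             if x % i == 0:
--                 hashtab[i] += _x_
--             while x % i == 0:
--                 x //= i
--             if i == 2:
--                 i = 3
--             else:
--                 i += 2
--
--     return [[key, value] for key, value in sorted(hashtab.items())]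
-- ===== SOURCE B (Python) =====
-- def sum_for_list_05(lst):
--     sums = {}
--     for x in lst:
--         n = abs(x)
--         i = 2
--         while i * i <= n:
--             if n % i == 0:
--                 sums[i] = sums.get(i, 0) + x
--                 while n % i == 0:
--                     n //= i
--             i = 3 if i == 2 else i + 2
--         if n > 1:
--             sums[n] = sums.get(n, 0) + x
--     return [[p, s] for p, s in sorted(sums.items())]
-- ===== Notes on version B (the rewrite author's own statement) =====
-- stated objective: faster
-- what changed: B trial-divides each element only by candidates up to sqrt(n), then records the single remaining prime factor separately, instead of A's scan of candidates all the way up to n.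
import Mathlib
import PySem

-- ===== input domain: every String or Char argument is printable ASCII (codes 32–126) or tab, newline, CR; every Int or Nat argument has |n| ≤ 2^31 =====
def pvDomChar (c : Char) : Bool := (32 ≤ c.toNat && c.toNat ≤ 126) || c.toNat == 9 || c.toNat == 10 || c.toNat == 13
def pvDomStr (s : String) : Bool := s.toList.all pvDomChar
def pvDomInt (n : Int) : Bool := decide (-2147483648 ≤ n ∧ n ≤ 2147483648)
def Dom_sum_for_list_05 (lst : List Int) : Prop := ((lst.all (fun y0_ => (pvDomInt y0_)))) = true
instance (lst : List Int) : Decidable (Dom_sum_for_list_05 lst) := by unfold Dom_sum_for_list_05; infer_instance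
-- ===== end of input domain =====

-- B replaces A's trial division by every candidate up to x (linear in x for a prime x)
-- with trial division only up to √x plus a separate leftover prime factor.

-- ===== PORT A =====

-- facts used by the termination proofs below (cited there so the proof terms stay small)
theorem pvFdivLt (x i : Int) (hi : 1 < i) (hx : 0 < x) :
    0 ≤ PySem.Int.floordiv x i ∧ PySem.Int.floordiv x i < x := by
  have h2 : PySem.Int.floordiv x i = x / i := PySem.Int.floordiv_eq_ediv_of_pos (by omega)
  constructor
  · rw [h2]; exact Int.ediv_nonneg (by omega) (by omega)
  · rw [h2]; apply Int.ediv_lt_of_lt_mul (by omega); nlinarith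

theorem pvSqLeSelf (n i : Int) (h : i * i ≤ n) : i ≤ n := by
  by_cases hc : i ≤ 0
  · nlinarith [mul_self_nonneg i]
  · nlinarith

theorem pvStripDec (x i : Int) (h : 1 < i ∧ 0 < x ∧ PySem.Int.mod x i = 0) :
    (PySem.Int.floordiv x i).toNat < x.toNat := by
  have h2 := pvFdivLt x i h.1 h.2.1
  omega

-- shared helper: the inner `while x % i == 0: x //= i` loop (textually identical in both Pythons);
-- the `1 < i ∧ 0 < x` conjuncts are totality guards only (always true at the call sites)
def pvStrip (x i : Int) : Int :=
  if h : 1 < i ∧ 0 < x ∧ PySem.Int.mod x i = 0 then pvStrip (PySem.Int.floordiv x i) i else x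
termination_by x.toNat
decreasing_by
  exact pvStripDec x i h

theorem pvStrip_le (x i : Int) : pvStrip x i ≤ x := by
  unfold pvStrip
  split
  · rename_i h
    have h2 := pvFdivLt x i h.1 h.2.1
    have := pvStrip_le (PySem.Int.floordiv x i) i
    omega
  · exact le_refl x
termination_by x.toNat
decreasing_by
  rename_i h
  have h2 : PySem.Int.floordiv x i = x / i := PySem.Int.floordiv_eq_ediv_of_pos (by omega)
  have h3 : x / i < x := by
    apply Int.ediv_lt_of_lt_mul (by omega); nlinarith [h.1, h.2.1]
  have h4 : 0 ≤ x / i := Int.ediv_nonneg (by omega) (by omega)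
  omega

theorem pvALoopDec (x i : Int) (hle : pvStrip x i ≤ x) (h : i ≤ x) :
    (pvStrip x i + 1 - if i = 2 then 3 else i + 2).toNat < (x + 1 - i).toNat := by
  split <;> omega

-- A's outer `while i <= x` loop over one element (orig = the original signed x)
def pvALoop (orig x i : Int) (d : PySem.Dict Int Int) : PySem.Dict Int Int :=
  if h : i ≤ x then
    pvALoop orig (pvStrip x i) (if i = 2 then 3 else i + 2)
      (if PySem.Int.mod x i = 0 then d.modify i 0 (· + orig) else d)
  else d
termination_by (x + 1 - i).toNat
decreasing_by
  exact pvALoopDec x i (pvStrip_le x i) h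

def sum_for_list_05 (lst : List Int) : List (List Int) :=
  let hashtab := lst.foldl (fun d x => pvALoop x (if x < 0 then -x else x) 2 d) PySem.Dict.empty
  (PySem.List.sorted2 hashtab.items (·.1) (·.2)).map (fun p => [p.1, p.2])

-- ===== PORT B =====
theorem pvBLoopDec (n i : Int) (h : i ≤ n) :
    (n + 1 - if i = 2 then 3 else i + 2).toNat < (n + 1 - i).toNat := by
  split <;> omega

-- B's `while i * i <= n` loop; returns the leftover n together with the dict
def pvBLoop (orig n i : Int) (d : PySem.Dict Int Int) : Int × PySem.Dict Int Int :=
  if h : i * i ≤ n then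
    if PySem.Int.mod n i = 0 then
      pvBLoop orig (pvStrip n i) (if i = 2 then 3 else i + 2)
        (d.insert i (d.getD i 0 + orig))
    else
      pvBLoop orig n (if i = 2 then 3 else i + 2) d
  else (n, d)
termination_by (n + 1 - i).toNat
decreasing_by
  · exact pvALoopDec n i (pvStrip_le n i) (pvSqLeSelf n i h)
  · exact pvBLoopDec n i (pvSqLeSelf n i h)

def sum_for_list_05_alt (lst : List Int) : List (List Int) :=
  let sums := lst.foldl (fun d x =>
    let p := pvBLoop x |x| 2 d
    if 1 < p.1 then p.2.insert p.1 (p.2.getD p.1 0 + x) else p.2) PySem.Dict.empty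
  (PySem.List.sorted2 sums.items (·.1) (·.2)).map (fun p => [p.1, p.2])

-- ===== PRECONDITION & SPEC =====
def Spec_sum_for_list_05 (lst : List Int) (out : List (List Int)) : Prop := out = sum_for_list_05_alt lst
instance (lst : List Int) (out : List (List Int)) : Decidable (Spec_sum_for_list_05 lst out) := by unfold Spec_sum_for_list_05; infer_instance

-- ===== CLAIM (what is proved, stated in full; the proofs are below) =====
def Claim_equal_sum_for_list_05 : Prop := ∀ (lst : List Int), Dom_sum_for_list_05 lst → Spec_sum_for_list_05 lst (sum_for_list_05 lst)

-- ===== LEMMAS AND PROOFS =====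

-- B's loop followed by the leftover-factor insertion, as one function (proof helper)
def pvBTail (orig n i : Int) (d : PySem.Dict Int Int) : PySem.Dict Int Int :=
  let p := pvBLoop orig n i d
  if 1 < p.1 then p.2.insert p.1 (p.2.getD p.1 0 + orig) else p.2

theorem pvBTail_step_dvd (orig n i : Int) (d : PySem.Dict Int Int)
    (hii : i * i ≤ n) (hmod : PySem.Int.mod n i = 0) :
    pvBTail orig n i d =
      pvBTail orig (pvStrip n i) (if i = 2 then 3 else i + 2) (d.insert i (d.getD i 0 + orig)) := by
  unfold pvBTail
  conv_lhs => rw [pvBLoop]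
  rw [dif_pos hii, if_pos hmod]

theorem pvBTail_step_ndvd (orig n i : Int) (d : PySem.Dict Int Int)
    (hii : i * i ≤ n) (hmod : ¬ PySem.Int.mod n i = 0) :
    pvBTail orig n i d = pvBTail orig n (if i = 2 then 3 else i + 2) d := by
  unfold pvBTail
  conv_lhs => rw [pvBLoop]
  rw [dif_pos hii, if_neg hmod]

theorem pvBTail_stop (orig n i : Int) (d : PySem.Dict Int Int) (hii : ¬ i * i ≤ n) :
    pvBTail orig n i d = if 1 < n then d.insert n (d.getD n 0 + orig) else d := by
  unfold pvBTail
  conv_lhs => rw [pvBLoop]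
  rw [dif_neg hii]

theorem pvStrip_pos (x i : Int) (hx : 0 < x) : 0 < pvStrip x i := by
  unfold pvStrip
  split
  · rename_i h
    apply pvStrip_pos
    have h2 : PySem.Int.floordiv x i = x / i := PySem.Int.floordiv_eq_ediv_of_pos (by omega)
    have hdvd : i ∣ x := (PySem.Int.mod_eq_zero_iff_dvd x i).mp h.2.2
    rcases hdvd with ⟨c, hc⟩
    have hc' : x / i = c := by rw [hc, Int.mul_ediv_cancel_left _ (by omega)]
    have : 0 < c := by nlinarith [h.1]
    omega
  · exact hx
termination_by x.toNat
decreasing_by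
  rename_i h
  have h2 : PySem.Int.floordiv x i = x / i := PySem.Int.floordiv_eq_ediv_of_pos (by omega)
  have h3 : x / i < x := by
    apply Int.ediv_lt_of_lt_mul (by omega); nlinarith [h.1, h.2.1]
  have h4 : 0 ≤ x / i := Int.ediv_nonneg (by omega) (by omega)
  omega

theorem pvStrip_dvd (x i : Int) : pvStrip x i ∣ x := by
  unfold pvStrip
  split
  · rename_i h
    have hdvd : i ∣ x := (PySem.Int.mod_eq_zero_iff_dvd x i).mp h.2.2
    have h2 : PySem.Int.floordiv x i = x / i := PySem.Int.floordiv_eq_ediv_of_pos (by omega)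
    have hrec := pvStrip_dvd (PySem.Int.floordiv x i) i
    have hq : PySem.Int.floordiv x i ∣ x := by
      rcases hdvd with ⟨c, hc⟩
      refine ⟨i, ?_⟩
      rw [h2, hc, Int.mul_ediv_cancel_left _ (by omega)]
      ring
    exact hrec.trans hq
  · exact dvd_refl x
termination_by x.toNat
decreasing_by
  rename_i h
  have h2 : PySem.Int.floordiv x i = x / i := PySem.Int.floordiv_eq_ediv_of_pos (by omega)
  have h3 : x / i < x := by
    apply Int.ediv_lt_of_lt_mul (by omega); nlinarith [h.1, h.2.1]
  have h4 : 0 ≤ x / i := Int.ediv_nonneg (by omega) (by omega)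
  omega

theorem pvStrip_not_dvd (x i : Int) (hx : 0 < x) (hi : 1 < i) : ¬ i ∣ pvStrip x i := by
  unfold pvStrip
  split
  · rename_i h
    exact pvStrip_not_dvd (PySem.Int.floordiv x i) i (by
      have h2 : PySem.Int.floordiv x i = x / i := PySem.Int.floordiv_eq_ediv_of_pos (by omega)
      have hdvd : i ∣ x := (PySem.Int.mod_eq_zero_iff_dvd x i).mp h.2.2
      rcases hdvd with ⟨c, hc⟩
      have hc' : x / i = c := by rw [hc, Int.mul_ediv_cancel_left _ (by omega)]
      have : 0 < c := by nlinarith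
      omega) hi
  · rename_i h
    intro hdvd
    exact h ⟨hi, hx, (PySem.Int.mod_eq_zero_iff_dvd x i).mpr hdvd⟩
termination_by x.toNat
decreasing_by
  rename_i h
  have h2 : PySem.Int.floordiv x i = x / i := PySem.Int.floordiv_eq_ediv_of_pos (by omega)
  have h3 : x / i < x := by
    apply Int.ediv_lt_of_lt_mul (by omega); nlinarith [h.1, h.2.1]
  have h4 : 0 ≤ x / i := Int.ediv_nonneg (by omega) (by omega)
  omega

theorem pvStrip_of_not_dvd (x i : Int) (h : ¬ PySem.Int.mod x i = 0) : pvStrip x i = x := by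
  unfold pvStrip
  rw [dif_neg]
  intro hc; exact h hc.2.2

theorem pvModifyEq (d : PySem.Dict Int Int) (i orig : Int) :
    d.modify i 0 (· + orig) = d.insert i (d.getD i 0 + orig) := by
  simp [PySem.Dict.modify]

-- successor step of the candidate sequence 2, 3, 5, 7, …
theorem pvNext2 (i : Int) (hi : 2 ≤ i) : 2 ≤ (if i = 2 then 3 else i + 2) := by
  split <;> omega

theorem pvNextOdd (i : Int) (hodd : i = 2 ∨ i % 2 = 1) :
    (if i = 2 then 3 else i + 2) = 2 ∨ (if i = 2 then 3 else i + 2) % 2 = 1 := by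
  rcases hodd with h | h
  · right; simp [h]
  · right; split
    · omega
    · omega

-- no divisor of x lies in [2, next i) given none lies in [2, i), i ∤ x, and i ∈ {2} ∪ odds
theorem pvNextInv (x i : Int) (hi : 2 ≤ i) (hodd : i = 2 ∨ i % 2 = 1)
    (hnd : ∀ j, 2 ≤ j → j < i → ¬ j ∣ x) (hix : ¬ i ∣ x) :
    ∀ j, 2 ≤ j → j < (if i = 2 then 3 else i + 2) → ¬ j ∣ x := by
  intro j hj2 hjlt hjx
  by_cases hji : j < i
  · exact hnd j hj2 hji hjx
  · by_cases hje : j = i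
    · exact hix (hje ▸ hjx)
    · have hji1 : j = i + 1 := by split at hjlt <;> omega
      rcases hodd with h2 | hodd'
      · omega
      · have h2x : (2:Int) ∣ x := ((by omega : (2:Int) ∣ j).trans hjx)
        exact hnd 2 (by omega) (by omega) h2x

-- the core equivalence: on an element with no divisor in [2, i), A's full trial-division
-- loop equals B's √-bounded loop plus the leftover insertion
theorem pvLoop_eq (orig x i : Int) (d : PySem.Dict Int Int)
    (hx : 0 < x) (hi : 2 ≤ i) (hodd : i = 2 ∨ i % 2 = 1)
    (hnd : ∀ j, 2 ≤ j → j < i → ¬ j ∣ x) :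
    pvALoop orig x i d = pvBTail orig x i d := by
  by_cases hix : i ≤ x
  · by_cases hii : i * i ≤ x
    · -- both loops take one identical step
      by_cases hmod : PySem.Int.mod x i = 0
      · have hsp := pvStrip_pos x i hx
        have hsd := pvStrip_dvd x i
        have hsnd := pvStrip_not_dvd x i hx (by omega)
        have hnd' : ∀ j, 2 ≤ j → j < i → ¬ j ∣ pvStrip x i :=
          fun j h1 h2 hd => hnd j h1 h2 (hd.trans hsd)
        rw [pvALoop, dif_pos hix, if_pos hmod, pvModifyEq,
          pvLoop_eq orig (pvStrip x i) _ _ hsp (pvNext2 i hi) (pvNextOdd i hodd)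
            (pvNextInv (pvStrip x i) i hi hodd hnd' hsnd),
          ← pvBTail_step_dvd orig x i d hii hmod]
      · have hndiv : ¬ i ∣ x := fun hd => hmod ((PySem.Int.mod_eq_zero_iff_dvd x i).mpr hd)
        rw [pvALoop, dif_pos hix, if_neg hmod, pvStrip_of_not_dvd x i hmod,
          pvLoop_eq orig x _ _ hx (pvNext2 i hi) (pvNextOdd i hodd)
            (pvNextInv x i hi hodd hnd hndiv),
          ← pvBTail_step_ndvd orig x i d hii hmod]
    · -- i ≤ x < i*i : B's loop stops here; A finds at most the factor x itself
      by_cases hmod : PySem.Int.mod x i = 0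
      · -- then x = i exactly
        have hdvd : i ∣ x := (PySem.Int.mod_eq_zero_iff_dvd x i).mp hmod
        rcases hdvd with ⟨m, hm⟩
        have hm1 : m = 1 := by
          by_contra hne
          have hm2 : 2 ≤ m := by
            by_contra hlt
            have hm0 : m ≤ 0 := by omega
            have hcon : 0 ≤ i * (-m) := mul_nonneg (by omega) (by omega)
            nlinarith
          have hmlt : m < i := by
            by_contra hge
            push_neg at hge
            have : i * i ≤ i * m := mul_le_mul_of_nonneg_left hge (by omega)
            omega
          exact hnd m hm2 hmlt ⟨i, by rw [hm]; ring⟩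
        have hxi : x = i := by rw [hm, hm1, mul_one]
        have hstrip1 : pvStrip x i = 1 := by
          have h1 := pvStrip_pos x i hx
          have h2 := pvStrip_dvd x i
          have h3 := pvStrip_not_dvd x i hx (by omega)
          have h4 := pvStrip_le x i
          by_contra hne
          have h5 : 2 ≤ pvStrip x i := by omega
          have h6 : pvStrip x i ≠ i := by intro hc; apply h3; rw [hc]
          have h8 : pvStrip x i < i := by omega
          exact hnd _ h5 h8 h2
        rw [pvALoop, dif_pos hix, if_pos hmod, hstrip1, pvALoop,
          dif_neg (by split <;> omega), pvModifyEq,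
          pvBTail_stop orig x i d hii, if_pos (by omega : (1:Int) < x), hxi]
      · -- not divisible: A moves on; that tail still ends by inserting x
        have hndiv : ¬ i ∣ x := fun hd => hmod ((PySem.Int.mod_eq_zero_iff_dvd x i).mpr hd)
        have hnn : ¬ (if i = 2 then 3 else i + 2) * (if i = 2 then 3 else i + 2) ≤ x := by
          split <;> nlinarith
        rw [pvALoop, dif_pos hix, if_neg hmod, pvStrip_of_not_dvd x i hmod,
          pvLoop_eq orig x _ _ hx (pvNext2 i hi) (pvNextOdd i hodd)
            (pvNextInv x i hi hodd hnd hndiv),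
          pvBTail_stop orig x _ d hnn, pvBTail_stop orig x i d hii]
  · -- i > x : the invariant forces x = 1, both sides return d
    have hx1 : x = 1 := by
      by_contra hne
      exact hnd x (by omega) (by omega) (dvd_refl x)
    rw [pvALoop, dif_neg hix, pvBTail_stop orig x i d (by nlinarith), if_neg (by omega)]
termination_by (x + 1 - i).toNat
decreasing_by
  · have h1 := pvStrip_le x i
    split <;> omega
  · split <;> omega
  · split <;> omega

theorem pvElem_eq (x : Int) (d : PySem.Dict Int Int) :
    pvALoop x (if x < 0 then -x else x) 2 d =
      (let p := pvBLoop x |x| 2 d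
       if 1 < p.1 then p.2.insert p.1 (p.2.getD p.1 0 + x) else p.2) := by
  have habs : |x| = if x < 0 then -x else x := by
    split
    · exact abs_of_neg (by omega)
    · exact abs_of_nonneg (by omega)
  show pvALoop x (if x < 0 then -x else x) 2 d = pvBTail x |x| 2 d
  rw [habs]
  by_cases hx0 : x = 0
  · subst hx0
    rw [pvALoop, dif_neg (by norm_num), pvBTail_stop _ _ _ _ (by norm_num)]
    norm_num
  · have hpos : 0 < (if x < 0 then -x else x) := by split <;> omega
    exact pvLoop_eq x _ 2 d hpos (le_refl 2) (Or.inl rfl) (by intro j h1 h2; omega)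

-- ===== VERDICT (by name: the statement is the Claim_ definition above) =====
theorem sum_for_list_05_spec : Claim_equal_sum_for_list_05 := by
  intro lst _
  unfold Spec_sum_for_list_05 sum_for_list_05 sum_for_list_05_alt
  have hfun : (fun (d : PySem.Dict Int Int) (x : Int) => pvALoop x (if x < 0 then -x else x) 2 d) =
      (fun (d : PySem.Dict Int Int) (x : Int) =>
        let p := pvBLoop x |x| 2 d
        if 1 < p.1 then p.2.insert p.1 (p.2.getD p.1 0 + x) else p.2) :=
    funext fun d => funext fun x => pvElem_eq x d
  rw [hfun]
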